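-- pv_equiv track=rewrite | github.com/italymoscow/advent-of-code | 2023/13/13_1.py | has_mirrored_row
-- ===== SOURCE A (Python) =====
-- def has_mirrored_row(pattern: list, start_row, finish_row):
--     if finish_row - start_row > 1:
--         if pattern[start_row] == pattern[finish_row]:
--             return has_mirrored_row(pattern, start_row + 1, finish_row - 1)
--         else:
--             return False
--     elif finish_row - start_row == 1:
--         if pattern[start_row] == pattern[finish_row]:
--             return True
--         else:
--             return False
--     else:
--         return True
-- ===== SOURCE B (Python) =====
-- def has_mirrored_row(pattern: list, start_row, finish_row):
--     pairs = (finish_row - start_row + 1) // 2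
--     return all(pattern[start_row + k] == pattern[finish_row - k] for k in range(pairs))
-- ===== Notes on version B (the rewrite author's own statement) =====
-- stated objective: idiomatic
-- what changed: Replaced A's recursion (and its three-way branch on finish_row - start_row) by a single all(...) over a closed-form count (f-s+1)//2 of index pairs, comparing pattern[start_row+k] with pattern[finish_row-k].
import Mathlib
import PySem

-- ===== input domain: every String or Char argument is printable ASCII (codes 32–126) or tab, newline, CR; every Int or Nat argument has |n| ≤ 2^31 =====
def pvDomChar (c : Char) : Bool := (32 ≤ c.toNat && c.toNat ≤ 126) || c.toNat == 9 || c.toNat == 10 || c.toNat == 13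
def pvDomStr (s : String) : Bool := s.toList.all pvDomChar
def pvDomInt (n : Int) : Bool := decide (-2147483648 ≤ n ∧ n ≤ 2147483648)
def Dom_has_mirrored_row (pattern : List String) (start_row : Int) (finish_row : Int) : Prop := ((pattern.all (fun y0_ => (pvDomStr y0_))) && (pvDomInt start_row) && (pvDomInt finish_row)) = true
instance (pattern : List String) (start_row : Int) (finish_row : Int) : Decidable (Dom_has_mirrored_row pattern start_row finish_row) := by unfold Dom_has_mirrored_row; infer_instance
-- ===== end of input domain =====

-- B replaces A's recursion by a single all(...) over a closed-form count of index pairs (same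
-- cost, 'idiomatic' objective); equivalence of the RETURN value is claimed on Pre_ (no IndexError).

-- ===== PORT A =====
def has_mirrored_row (pattern : List String) (start_row : Int) (finish_row : Int) : Bool :=
  if finish_row - start_row > 1 then
    if PySem.List.pyGet? pattern start_row == PySem.List.pyGet? pattern finish_row then
      has_mirrored_row pattern (start_row + 1) (finish_row - 1)
    else
      false
  else if finish_row - start_row == 1 then
    if PySem.List.pyGet? pattern start_row == PySem.List.pyGet? pattern finish_row then
      true
    else
      false
  else
    true
termination_by (finish_row - start_row).toNat
decreasing_by omega

-- ===== PORT B =====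
def has_mirrored_row_alt (pattern : List String) (start_row : Int) (finish_row : Int) : Bool :=
  let pairs := PySem.Int.floordiv (finish_row - start_row + 1) 2
  (PySem.List.pyRange 0 pairs 1).all fun k =>
    PySem.List.pyGet? pattern (start_row + k) == PySem.List.pyGet? pattern (finish_row - k)

-- ===== PRECONDITION & SPEC =====
-- Pre_ excludes exactly the inputs on which A raises IndexError: an access happens iff
-- finish_row - start_row ≥ 1, and then the very first pair of indices already decides validity.
def Pre_has_mirrored_row (pattern : List String) (start_row : Int) (finish_row : Int) : Prop :=
  finish_row - start_row ≤ 0 ∨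
    (PySem.Raise.InRange pattern.length start_row ∧ PySem.Raise.InRange pattern.length finish_row)
instance (pattern : List String) (start_row : Int) (finish_row : Int) : Decidable (Pre_has_mirrored_row pattern start_row finish_row) := by unfold Pre_has_mirrored_row; infer_instance
def pvWitness_has_mirrored_row : List String × Int × Int := (["ab", "cd", "ab"], 0, 2)

def Spec_has_mirrored_row (pattern : List String) (start_row : Int) (finish_row : Int) (out : Bool) : Prop := out = has_mirrored_row_alt pattern start_row finish_row
instance (pattern : List String) (start_row : Int) (finish_row : Int) (out : Bool) : Decidable (Spec_has_mirrored_row pattern start_row finish_row out) := by unfold Spec_has_mirrored_row; infer_instance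

-- ===== CLAIM (what is proved, stated in full; the proofs are below) =====
def Claim_equal_has_mirrored_row : Prop := ∀ (pattern : List String) (start_row : Int) (finish_row : Int), Dom_has_mirrored_row pattern start_row finish_row → Pre_has_mirrored_row pattern start_row finish_row → Spec_has_mirrored_row pattern start_row finish_row (has_mirrored_row pattern start_row finish_row)

-- ===== LEMMAS AND PROOFS =====

-- Common form: the conjunction of the first n pair comparisons.
def mirrorAll (pattern : List String) (n : Nat) (s f : Int) : Bool :=
  (List.range n).all fun k =>
    PySem.List.pyGet? pattern (s + (k : Int)) == PySem.List.pyGet? pattern (f - (k : Int))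

theorem mirrorAll_succ (pattern : List String) (n : Nat) (s f : Int) :
    mirrorAll pattern (n + 1) s f =
      ((PySem.List.pyGet? pattern s == PySem.List.pyGet? pattern f) &&
        mirrorAll pattern n (s + 1) (f - 1)) := by
  unfold mirrorAll
  rw [List.range_succ_eq_map]
  simp only [List.all_cons, List.all_map, Int.natCast_zero, add_zero, sub_zero]
  congr 1
  apply List.all_congr rfl
  intro k
  have e1 : s + ((k : Nat) + 1 : Nat) = s + 1 + (k : Int) := by push_cast; ring
  have e2 : f - ((k : Nat) + 1 : Nat) = f - 1 - (k : Int) := by push_cast; ring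
  simp only [Function.comp_apply, Nat.succ_eq_add_one, e1, e2]

theorem alt_eq_mirrorAll (pattern : List String) (s f : Int) :
    has_mirrored_row_alt pattern s f =
      mirrorAll pattern (PySem.Int.floordiv (f - s + 1) 2).toNat s f := by
  unfold has_mirrored_row_alt mirrorAll
  simp only [PySem.List.pyRange_one, List.all_map, sub_zero]
  apply List.all_congr rfl
  intro k
  simp

theorem a_eq_mirrorAll (pattern : List String) :
    ∀ (n : Nat) (s f : Int), (f - s).toNat = n →
      has_mirrored_row pattern s f =
        mirrorAll pattern (PySem.Int.floordiv (f - s + 1) 2).toNat s f := by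
  intro n
  induction n using Nat.strong_induction_on with
  | _ n ih =>
    intro s f hn
    have hmb : PySem.Int.floordiv (f - s + 1) 2 * 2 ≤ f - s + 1 ∧
        f - s + 1 < (PySem.Int.floordiv (f - s + 1) 2 + 1) * 2 :=
      (PySem.Int.floordiv_eq_iff_of_pos (by omega)).mp rfl
    by_cases h2 : f - s > 1
    · -- d ≥ 2 : one comparison, then the recursive call
      have hm' : PySem.Int.floordiv (f - 1 - (s + 1) + 1) 2 =
          PySem.Int.floordiv (f - s + 1) 2 - 1 := by
        rw [PySem.Int.floordiv_eq_iff_of_pos (by omega)]; omega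
      have hrec := ih (f - 1 - (s + 1)).toNat (by omega) (s + 1) (f - 1) rfl
      rw [hm'] at hrec
      have hsplit : (PySem.Int.floordiv (f - s + 1) 2).toNat =
          (PySem.Int.floordiv (f - s + 1) 2 - 1).toNat + 1 := by omega
      rw [has_mirrored_row, if_pos h2, hsplit, mirrorAll_succ, ← hrec]
      cases hc : (PySem.List.pyGet? pattern s == PySem.List.pyGet? pattern f) <;> simp [*]
    · by_cases h1 : f - s = 1
      · -- d = 1 : exactly one comparison
        have hm : (PySem.Int.floordiv (f - s + 1) 2).toNat = 1 := by omega
        have hmir : mirrorAll pattern 1 s f =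
            (PySem.List.pyGet? pattern s == PySem.List.pyGet? pattern f) := by
          unfold mirrorAll; simp
        rw [has_mirrored_row, if_neg h2, hm, hmir,
          if_pos (by simp [h1] : (f - s == 1) = true)]
        cases hc : (PySem.List.pyGet? pattern s == PySem.List.pyGet? pattern f) <;> simp [*]
      · -- d ≤ 0 : both sides are True
        have hm : (PySem.Int.floordiv (f - s + 1) 2).toNat = 0 := by omega
        rw [has_mirrored_row, if_neg h2, hm]
        unfold mirrorAll
        simp [h1]

-- ===== VERDICT (by name: the statement is the Claim_ definition above) =====
theorem has_mirrored_row_spec : Claim_equal_has_mirrored_row := by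
  intro pattern s f _ _
  unfold Spec_has_mirrored_row
  rw [a_eq_mirrorAll pattern (f - s).toNat s f rfl, alt_eq_mirrorAll]
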